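-- pv_equiv track=rewrite | github.com/moo-on/Algorithm | test3.py | solution
-- ===== SOURCE A (Python) =====
-- def solution(s):
--     answer = []
--     rev_s = s[::-1]
--
--     cnt = 0
--     for i, e in enumerate(rev_s):
--         if e == s[0]:
--             cnt += 1
--         else:
--             break
--
--     cnt_s = cnt
--     discri = s[0]
--
--     if cnt == len(s):
--         return [cnt]
--
--     if cnt == 0:
--         cnt = -len(s)
--         cnt_s = 0
--
--     for e in s[:-cnt]:
--         if discri == e:
--             cnt_s += 1
--         else:
--             answer.append(cnt_s)
--             cnt_s = 1
--             discri = e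
--
--     answer.append(cnt_s)
--     answer.sort()
--
--     return answer
-- ===== SOURCE B (Python) =====
-- def solution(s):
--     first = s[0]  # non-empty required, like A
--     n = len(s)
--     # positions where a new run starts (boundary indices)
--     cuts = [i for i, (a, b) in enumerate(zip(s, s[1:]), 1) if a != b]
--     if not cuts:
--         return [n]
--     lens = [b - a for a, b in zip(cuts, cuts[1:])]
--     if s[-1] == first:
--         lens.append(cuts[0] + n - cuts[-1])
--     else:
--         lens.append(cuts[0])
--         lens.append(n - cuts[-1])
--     return sorted(lens)
-- ===== Notes on version B (the rewrite author's own statement) =====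
-- stated objective: alternative
-- what changed: Instead of scanning runs with a count accumulator (A counts the trailing run, then re-scans accumulating run lengths), B never counts runs at all: it collects the boundary positions i where s[i] != s[i-1], and derives every length by index arithmetic (differences of consecutive boundaries, first boundary, n minus last boundary, merging the two end lengths when s[-1] == s[0]).
import Mathlib
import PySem

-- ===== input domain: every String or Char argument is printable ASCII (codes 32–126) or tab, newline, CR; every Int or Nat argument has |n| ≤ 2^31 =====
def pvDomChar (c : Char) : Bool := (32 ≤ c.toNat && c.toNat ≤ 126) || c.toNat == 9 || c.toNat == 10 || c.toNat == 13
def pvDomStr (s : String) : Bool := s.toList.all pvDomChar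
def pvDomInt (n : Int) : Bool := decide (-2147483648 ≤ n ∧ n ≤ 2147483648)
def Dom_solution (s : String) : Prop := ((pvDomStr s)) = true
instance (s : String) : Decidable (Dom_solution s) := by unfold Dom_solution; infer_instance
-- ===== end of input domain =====

-- B replaces A's run-counting scans by boundary positions (indices where s[i] != s[i-1])
-- and derives every run length by index arithmetic (alternative decomposition, same cost).
-- Pre_ excludes only the empty string, on which both Pythons raise IndexError.

-- ===== PORT A =====
-- cnt loop: 'for i, e in enumerate(rev_s): if e == s[0]: cnt += 1 else: break'
def pvCntA (c0 : Char) : List Char → Int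
  | [] => 0
  | e :: xs => if e == c0 then pvCntA c0 xs + 1 else 0

-- body of A's main 'for e in s[:-cnt]' loop, state (answer, cnt_s, discri)
def pvStepA (st : List Int × Int × Char) (e : Char) : List Int × Int × Char :=
  if st.2.2 == e then (st.1, st.2.1 + 1, st.2.2) else (st.1 ++ [st.2.1], 1, e)

def solution (s : String) : List Int :=
  match PySem.Str.pyGet? s 0 with
  | none => []                      -- IndexError on the empty string (outside Pre_)
  | some c0 =>
    let cs := s.toList
    let cnt : Int := pvCntA c0 cs.reverse
    if cnt = (cs.length : Int) then [cnt]
    else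
      let p : Int × Int := if cnt = 0 then (-(cs.length : Int), 0) else (cnt, cnt)
      let pref := PySem.List.slice cs none (some (-p.1))   -- s[:-cnt]
      let st := pref.foldl pvStepA ([], p.2, c0)
      PySem.List.sorted (st.1 ++ [st.2.1]) (fun x => x) false

-- ===== PORT B =====
def solution_alt (s : String) : List Int :=
  match PySem.Str.pyGet? s 0 with
  | none => []                      -- IndexError on the empty string (outside Pre_)
  | some first =>
    let cs := s.toList
    let n : Int := (cs.length : Int)
    -- cuts = [i for i, (a, b) in enumerate(zip(s, s[1:]), 1) if a != b]
    let cuts : List Int :=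
      ((PySem.List.enumerate (cs.zip (PySem.List.slice cs (some 1) none)) 1).filter
        (fun p => !(p.2.1 == p.2.2))).map Prod.fst
    if cuts = [] then [n]
    else
      -- lens = [b - a for a, b in zip(cuts, cuts[1:])]
      let lens := (cuts.zip (PySem.List.slice cuts (some 1) none)).map
        (fun p : Int × Int => p.2 - p.1)
      -- s[-1] (s is non-empty here, so pyGetD is exact)
      let lens' := if PySem.List.pyGetD cs (-1) first == first
        then lens ++ [PySem.List.pyGetD cuts 0 0 + n - PySem.List.pyGetD cuts (-1) 0]
        else lens ++ [PySem.List.pyGetD cuts 0 0, n - PySem.List.pyGetD cuts (-1) 0]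
      PySem.List.sorted lens' (fun x => x) false

-- ===== PRECONDITION & SPEC =====
-- the empty string is excluded: both Pythons raise IndexError at s[0]
def Pre_solution (s : String) : Prop := s ≠ ""
instance (s : String) : Decidable (Pre_solution s) := by unfold Pre_solution; infer_instance
def pvWitness_solution : String := "aba"

def Spec_solution (s : String) (out : List Int) : Prop := out = solution_alt s
instance (s : String) (out : List Int) : Decidable (Spec_solution s out) := by unfold Spec_solution; infer_instance

-- ===== CLAIM (what is proved, stated in full; the proofs are below) =====
def Claim_equal_solution : Prop := ∀ (s : String), Dom_solution s → Pre_solution s → Spec_solution s (solution s)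

-- ===== LEMMAS AND PROOFS =====

-- run lengths of xs with an open run of character d counted k so far
def rleFrom (d : Char) (k : Int) : List Char → List Int
  | [] => [k]
  | e :: xs => if d == e then rleFrom d (k + 1) xs else k :: rleFrom e 1 xs

-- boundary positions of xs relative to previous character, starting at index j
def cutsC (j : Int) (prev : Char) : List Char → List Int
  | [] => []
  | x :: xs => if prev == x then cutsC (j + 1) x xs else j :: cutsC (j + 1) x xs

-- partial sums of run lengths, total omitted (the boundary positions)
def pcuts (off : Int) : List Int → List Int
  | [] => []
  | [_] => []
  | a :: b :: l => (off + a) :: pcuts (off + a) (b :: l)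

-- A's main loop computes rleFrom
theorem foldA_eq_rleFrom (xs : List Char) : ∀ (ans : List Int) (k : Int) (d : Char),
    (xs.foldl pvStepA (ans, k, d)).1 ++ [(xs.foldl pvStepA (ans, k, d)).2.1] =
      ans ++ rleFrom d k xs := by
  induction xs with
  | nil => intro ans k d; simp [rleFrom]
  | cons e xs ih =>
    intro ans k d
    rw [List.foldl_cons]
    by_cases h : d = e
    · rw [show pvStepA (ans, k, d) e = (ans, k + 1, d) from by simp [pvStepA, h],
        show rleFrom d k (e :: xs) = rleFrom d (k + 1) xs from by simp [rleFrom, h]]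
      exact ih ans (k + 1) d
    · rw [show pvStepA (ans, k, d) e = (ans ++ [k], 1, e) from by simp [pvStepA, h],
        show rleFrom d k (e :: xs) = k :: rleFrom e 1 xs from by simp [rleFrom, h],
        ih]
      simp

-- the head of rleFrom is k plus a run length independent of k
theorem rleFrom_shift (xs : List Char) : ∀ (d : Char) (k₁ k₂ : Int),
    ∃ m t, rleFrom d k₁ xs = (k₁ + m) :: t ∧ rleFrom d k₂ xs = (k₂ + m) :: t := by
  induction xs with
  | nil => intro d k₁ k₂; exact ⟨0, [], by simp [rleFrom], by simp [rleFrom]⟩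
  | cons e xs ih =>
    intro d k₁ k₂
    by_cases h : d = e
    · subst h
      obtain ⟨m, t, h1, h2⟩ := ih d (k₁ + 1) (k₂ + 1)
      refine ⟨m + 1, t, ?_, ?_⟩
      · simp only [rleFrom, beq_self_eq_true, if_true]
        rw [h1]; ring_nf
      · simp only [rleFrom, beq_self_eq_true, if_true]
        rw [h2]; ring_nf
    · exact ⟨0, rleFrom e 1 xs, by simp [rleFrom, h], by simp [rleFrom, h]⟩

theorem rleFrom_ne_nil (xs : List Char) (d : Char) (k : Int) : rleFrom d k xs ≠ [] := by
  induction xs generalizing d k with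
  | nil => simp [rleFrom]
  | cons e xs ih =>
    by_cases h : d = e
    · simpa [rleFrom, h] using ih d (k + 1)
    · simp [rleFrom, h]

theorem rleFrom_sum (xs : List Char) : ∀ (d : Char) (k : Int),
    (rleFrom d k xs).sum = k + xs.length := by
  induction xs with
  | nil => intro d k; simp [rleFrom]
  | cons e xs ih =>
    intro d k
    by_cases h : d = e
    · rw [show rleFrom d k (e :: xs) = rleFrom d (k + 1) xs from by simp [rleFrom, h], ih]
      push_cast [List.length_cons]; omega
    · rw [show rleFrom d k (e :: xs) = k :: rleFrom e 1 xs from by simp [rleFrom, h]]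
      rw [List.sum_cons, ih]
      push_cast [List.length_cons]; omega

theorem rleFrom_replicate (m : Nat) : ∀ (c : Char) (k : Int),
    rleFrom c k (List.replicate m c) = [k + m] := by
  induction m with
  | zero => intro c k; simp [rleFrom]
  | succ m ih =>
    intro c k
    rw [List.replicate_succ,
      show rleFrom c k (c :: List.replicate m c) = rleFrom c (k + 1) (List.replicate m c)
        from by simp [rleFrom], ih]
    congr 1
    push_cast; ring

theorem rleFrom_singleton (xs : List Char) : ∀ (d : Char) (k m : Int),
    rleFrom d k xs = [m] → xs = List.replicate xs.length d := by
  induction xs with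
  | nil => intro d k m _; simp
  | cons e xs ih =>
    intro d k m h
    by_cases hde : d = e
    · rw [show rleFrom d k (e :: xs) = rleFrom d (k + 1) xs from by simp [rleFrom, hde]] at h
      rw [List.length_cons, List.replicate_succ, ← hde]
      exact congrArg (d :: ·) (ih d (k + 1) m h)
    · rw [show rleFrom d k (e :: xs) = k :: rleFrom e 1 xs from by simp [rleFrom, hde]] at h
      exact absurd (List.cons_eq_cons.mp h).2.symm (by simpa using rleFrom_ne_nil xs e 1)

-- appending a trailing run of a fresh character adds one run length
theorem rleFrom_append_replicate (c : Char) (m : Nat) (hm : 0 < m) (xs : List Char) :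
    ∀ (prev : Char) (k : Int), (prev :: xs).getLast? ≠ some c →
    rleFrom prev k (xs ++ List.replicate m c) = rleFrom prev k xs ++ [(m : Int)] := by
  induction xs with
  | nil =>
    intro prev k hl
    have hpc : prev ≠ c := by simpa using hl
    obtain ⟨m', rfl⟩ : ∃ m', m = m' + 1 := ⟨m - 1, by omega⟩
    rw [List.nil_append, List.replicate_succ,
      show rleFrom prev k (c :: List.replicate m' c) = k :: rleFrom c 1 (List.replicate m' c)
        from by simp [rleFrom, hpc], rleFrom_replicate]
    simp [rleFrom]
    omega
  | cons x xs ih =>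
    intro prev k hl
    have hl' : (x :: xs).getLast? ≠ some c := by
      cases xs with
      | nil => simpa using hl
      | cons y ys => rwa [List.getLast?_cons_cons] at hl
    by_cases h : prev = x
    · subst h
      rw [List.cons_append,
        show rleFrom prev k (prev :: (xs ++ List.replicate m c)) =
          rleFrom prev (k + 1) (xs ++ List.replicate m c) from by simp [rleFrom],
        show rleFrom prev k (prev :: xs) = rleFrom prev (k + 1) xs from by simp [rleFrom]]
      exact ih prev (k + 1) hl'
    · rw [List.cons_append,
        show rleFrom prev k (x :: (xs ++ List.replicate m c)) =
          k :: rleFrom x 1 (xs ++ List.replicate m c) from by simp [rleFrom, h],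
        show rleFrom prev k (x :: xs) = k :: rleFrom x 1 xs from by simp [rleFrom, h],
        ih x 1 hl']
      simp

-- boundary positions are the partial sums of the run lengths
theorem cutsC_pcuts (xs : List Char) : ∀ (prev : Char) (j k : Int),
    cutsC j prev xs = pcuts (j - k) (rleFrom prev k xs) := by
  induction xs with
  | nil => intro prev j k; simp [cutsC, rleFrom, pcuts]
  | cons x xs ih =>
    intro prev j k
    by_cases h : prev = x
    · rw [show cutsC j prev (x :: xs) = cutsC (j + 1) x xs from by simp [cutsC, h],
        show rleFrom prev k (x :: xs) = rleFrom prev (k + 1) xs from by simp [rleFrom, h],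
        ih x (j + 1) (k + 1), h,
        show j + 1 - (k + 1) = j - k from by ring]
    · rw [show cutsC j prev (x :: xs) = j :: cutsC (j + 1) x xs from by simp [cutsC, h],
        show rleFrom prev k (x :: xs) = k :: rleFrom x 1 xs from by simp [rleFrom, h],
        ih x (j + 1) 1]
      obtain ⟨q, rest, hq⟩ := List.exists_cons_of_ne_nil (rleFrom_ne_nil xs x 1)
      rw [hq]
      show j :: pcuts (j + 1 - 1) (q :: rest) = pcuts (j - k) (k :: q :: rest)
      rw [show pcuts (j - k) (k :: q :: rest) = (j - k + k) :: pcuts (j - k + k) (q :: rest)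
          from by simp [pcuts],
        show j - k + k = j from by ring, show j + 1 - 1 = j from by ring]

-- B's comprehension over enumerate(zip(s, s[1:]), 1) computes cutsC
theorem filter_enumerate_eq_cutsC (t : List Char) : ∀ (prev : Char) (j : Int),
    ((PySem.List.enumerate ((prev :: t).zip t) j).filter
      (fun p => !(p.2.1 == p.2.2))).map Prod.fst = cutsC j prev t := by
  induction t with
  | nil => intro prev j; simp [cutsC]
  | cons x t ih =>
    intro prev j
    rw [List.zip_cons_cons, PySem.List.enumerate_cons]
    by_cases h : prev = x
    · rw [show cutsC j prev (x :: t) = cutsC (j + 1) x t from by simp [cutsC, h],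
        ← ih x (j + 1)]
      simp [h]
    · rw [show cutsC j prev (x :: t) = j :: cutsC (j + 1) x t from by simp [cutsC, h],
        ← ih x (j + 1)]
      simp [h]

theorem pcuts_cons_cons (off a b : Int) (l : List Int) :
    pcuts off (a :: b :: l) = (off + a) :: pcuts (off + a) (b :: l) := by
  simp [pcuts]

-- consecutive differences of the partial sums are the middle run lengths
theorem diffs_pcuts (l : List Int) : ∀ (off : Int),
    ((pcuts off l).zip ((pcuts off l).drop 1)).map (fun p : Int × Int => p.2 - p.1) =
      (l.drop 1).dropLast := by
  induction l with
  | nil => intro off; simp [pcuts]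
  | cons a l ih =>
    intro off
    cases l with
    | nil => simp [pcuts]
    | cons b l' =>
      cases l' with
      | nil => simp [pcuts]
      | cons c l'' =>
        have ihb := ih (off + a)
        rw [pcuts_cons_cons] at ihb
        rw [List.drop_one, List.tail_cons] at ihb
        rw [pcuts_cons_cons, pcuts_cons_cons,
          show List.drop 1 ((off + a) :: (off + a + b) :: pcuts (off + a + b) (c :: l'')) =
            (off + a + b) :: pcuts (off + a + b) (c :: l'') from rfl,
          List.zip_cons_cons, List.map_cons, ihb]
        simp

-- the last partial sum is off plus the sum of all but the last run length
theorem pcuts_getLast (l' : List Int) : ∀ (a b off : Int),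
    (pcuts off (a :: b :: l')).getLast? = some (off + (a :: b :: l').dropLast.sum) := by
  induction l' with
  | nil => intro a b off; simp [pcuts]
  | cons c l'' ih =>
    intro a b off
    rw [pcuts_cons_cons, pcuts_cons_cons]
    rw [List.getLast?_cons_cons, ← pcuts_cons_cons, ih b c (off + a)]
    congr 1
    simp
    ring

-- sorting with the identity key only sees the multiset
theorem sorted_id_congr_perm {xs ys : List Int} (h : xs.Perm ys) :
    PySem.List.sorted xs (fun x => x) false = PySem.List.sorted ys (fun x => x) false := by
  apply PySem.List.sorted_id_eq_of_perm_of_pairwise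
  · exact (PySem.List.sorted_perm ys (fun x => x) false).trans h.symm
  · exact PySem.List.sorted_pairwise ys (fun x => x)

-- pvCntA counts the matching prefix
theorem pvCntA_eq_takeWhile (c : Char) (xs : List Char) :
    pvCntA c xs = ((xs.takeWhile (fun e => e == c)).length : Int) := by
  induction xs with
  | nil => simp [pvCntA]
  | cons e xs ih =>
    by_cases h : e = c
    · simp [pvCntA, h, ih]
    · simp [pvCntA, h]

-- elements of the matching prefix are all c
theorem takeWhile_eq_replicate (c : Char) (xs : List Char) :
    xs.takeWhile (fun e => e == c) = List.replicate (xs.takeWhile (fun e => e == c)).length c := by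
  apply List.eq_replicate_of_mem
  intro b hb
  have := List.mem_takeWhile_imp hb
  simpa using this


-- first / last element of the cut-position list
theorem pcuts_pyGetD_zero (a b : Int) (l : List Int) :
    PySem.List.pyGetD (pcuts 0 (a :: b :: l)) 0 0 = a := by
  rw [pcuts_cons_cons, PySem.List.pyGetD_zero_cons]
  ring

theorem pcuts_pyGetD_neg_one (a b : Int) (l : List Int) :
    PySem.List.pyGetD (pcuts 0 (a :: b :: l)) (-1) 0 = (a :: b :: l).dropLast.sum := by
  have hne : pcuts 0 (a :: b :: l) ≠ [] := by rw [pcuts_cons_cons]; simp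
  rw [PySem.List.pyGetD_neg_one (h := hne)]
  have h1 := pcuts_getLast l a b 0
  rw [List.getLast?_eq_some_getLast hne] at h1
  have h2 := Option.some.inj h1
  omega

-- ===== main proof =====

theorem solution_eq (s : String) (hs : s ≠ "") : solution s = solution_alt s := by
  have hs' : s.toList ≠ [] := fun h => hs (String.toList_eq_nil_iff.mp h)
  obtain ⟨c0, t, hcs⟩ := List.exists_cons_of_ne_nil hs'
  have hget : PySem.Str.pyGet? s 0 = some c0 := by
    rw [show (0 : Int) = ((0 : Nat) : Int) from rfl, PySem.Str.pyGet?_natCast, hcs]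
    rfl
  unfold solution solution_alt
  simp only [hget]
  set L := s.toList with hL
  rw [pvCntA_eq_takeWhile c0 L.reverse]
  set tw := L.reverse.takeWhile (fun e => e == c0) with htw
  set dw := L.reverse.dropWhile (fun e => e == c0) with hdw
  have htwrep : tw = List.replicate tw.length c0 := takeWhile_eq_replicate c0 L.reverse
  have hsplit : L = dw.reverse ++ List.replicate tw.length c0 := by
    have h1 : tw ++ dw = L.reverse := List.takeWhile_append_dropWhile
    have h2 : L = (tw ++ dw).reverse := by rw [h1, List.reverse_reverse]
    rw [h2, List.reverse_append]
    congr 1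
    rw [htwrep]
    simp
  have hlen : tw.length ≤ L.length := by
    have := (List.takeWhile_prefix (fun e => e == c0) (l := L.reverse)).length_le
    simpa using this
  have hLne : L ≠ [] := by simp [hcs]
  set R := rleFrom c0 1 t with hR
  have hcuts : ((PySem.List.enumerate (L.zip (PySem.List.slice L (some 1) none)) 1).filter
      (fun p => !(p.2.1 == p.2.2))).map Prod.fst = pcuts 0 R := by
    rw [PySem.List.slice_from_one, hcs, List.tail_cons,
      filter_enumerate_eq_cutsC t c0 1, cutsC_pcuts t c0 1 1]
    norm_num [← hR]
  have hsumR : R.sum = (L.length : Int) := by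
    rw [hR, rleFrom_sum, hcs]
    push_cast [List.length_cons]
    ring
  by_cases hall : ((tw.length : Int) = (L.length : Int))
  · -- CASE 1: the whole string is a single run of c0
    rw [if_pos hall]
    have hn : tw.length = L.length := by exact_mod_cast hall
    have hdwnil : dw = [] := by
      have h1 := congrArg List.length hsplit
      simp at h1
      exact List.length_eq_zero_iff.mp (by omega)
    have hLrep : L = List.replicate tw.length c0 := by rw [hsplit, hdwnil]; simp
    have htlen : t.length + 1 = tw.length := by
      have := congrArg List.length hcs
      simp at this
      omega
    have ht_rep : t = List.replicate t.length c0 := by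
      have hc : c0 :: t = c0 :: List.replicate t.length c0 := by
        rw [← List.replicate_succ, ← hcs, hLrep]
        congr 1
        omega
      exact (List.cons_eq_cons.mp hc).2
    have hRsing : R = [(L.length : Int)] := by
      rw [hR]
      conv_lhs => rw [ht_rep]
      rw [rleFrom_replicate]
      have hc := congrArg List.length hcs
      simp at hc
      congr 1
      push_cast [hc]
      ring
    rw [hcuts, hRsing,
      if_pos (show pcuts 0 [((L.length : Nat) : Int)] = [] from by simp [pcuts]), hall]
  · rw [if_neg hall]
    -- R has at least two runs
    obtain ⟨r1, r2, rest, hR2⟩ : ∃ r1 r2 rest, R = r1 :: r2 :: rest := by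
      cases hRc : R with
      | nil => exact absurd (hR.symm.trans hRc) (rleFrom_ne_nil t c0 1)
      | cons a l =>
        cases l with
        | cons b l' => exact ⟨a, b, l', rfl⟩
        | nil =>
          exfalso
          apply hall
          have ht_rep := rleFrom_singleton t c0 1 a (hR.symm.trans hRc)
          have hLrep : L = List.replicate (t.length + 1) c0 := by
            rw [hcs, List.replicate_succ]
            exact congrArg (c0 :: ·) ht_rep
          have htw2 : tw = List.replicate (t.length + 1) c0 := by
            rw [htw, hLrep, List.reverse_replicate, List.takeWhile_replicate]
            simp
          have hLlen : L.length = t.length + 1 := by rw [hLrep]; simp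
          rw [htw2, hLlen]
          simp
    have hcutsne : ¬ (pcuts 0 R = []) := by rw [hR2, pcuts_cons_cons]; simp
    rw [hcuts, if_neg hcutsne]
    have hlens : ((pcuts 0 R).zip (PySem.List.slice (pcuts 0 R) (some 1) none)).map
        (fun p : Int × Int => p.2 - p.1) = (R.drop 1).dropLast := by
      rw [PySem.List.slice_from_one, ← List.drop_one]
      exact diffs_pcuts R 0
    by_cases hz : ((tw.length : Int) = 0)
    · -- CASE 2: the last character differs from c0 (no trailing run of it)
      rw [if_pos hz]
      have htwn : tw.length = 0 := by exact_mod_cast hz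
      have htwnil : tw = [] := List.length_eq_zero_iff.mp htwn
      have hs1 : PySem.List.slice L none (some (-(-(L.length, (0:Int)).1))) = L := by
        rw [show (-(-(((L.length : Nat) : Int)), (0:Int)).1) = ((L.length : Nat) : Int) from by simp,
          PySem.List.slice_to_natCast, List.take_length]
      rw [hs1]
      have hfold := foldA_eq_rleFrom L [] ((-(L.length : Int), (0:Int)).2) c0
      rw [List.nil_append] at hfold
      rw [hfold]
      have hA : rleFrom c0 ((-(L.length : Int), (0:Int)).2) L = R := by
        rw [hcs, hR]
        show rleFrom c0 0 (c0 :: t) = rleFrom c0 1 t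
        simp [rleFrom]
      rw [hA]
      -- last char of L is not c0
      have hrevne : L.reverse ≠ [] := by simp [hcs]
      obtain ⟨h1, rr, hrev⟩ := List.exists_cons_of_ne_nil hrevne
      have hh1 : ¬((h1 == c0) = true) := by
        intro hb
        have hcon := htwnil
        rw [htw, hrev, List.takeWhile_cons, if_pos hb] at hcon
        simp at hcon
      have hLlast : L.getLast? ≠ some c0 := by
        rw [← List.head?_reverse, hrev]
        intro hcon
        simp at hcon
        exact hh1 (by simp [hcon])
      have hcond : (PySem.List.pyGetD L (-1) c0 == c0) = false := by
        rw [PySem.List.pyGetD_neg_one (h := hLne)]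
        simp only [beq_eq_false_iff_ne, ne_eq]
        intro hEq
        exact hLlast (by rw [List.getLast?_eq_some_getLast hLne, hEq])
      rw [if_neg (show ¬((PySem.List.pyGetD L (-1) c0 == c0) = true) from by simp [hcond])]
      -- split off the last run length g
      obtain ⟨M, g, hMg⟩ : ∃ M g, r2 :: rest = M ++ [g] :=
        ⟨(r2 :: rest).dropLast, (r2 :: rest).getLast (by simp),
          (List.dropLast_append_getLast (by simp)).symm⟩
      have hRdec : R = r1 :: (M ++ [g]) := by rw [hR2, hMg]
      have hhead : PySem.List.pyGetD (pcuts 0 R) 0 0 = r1 := by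
        rw [hR2]; exact pcuts_pyGetD_zero r1 r2 rest
      have hlast : PySem.List.pyGetD (pcuts 0 R) (-1) 0 = R.dropLast.sum := by
        rw [hR2]
        exact pcuts_pyGetD_neg_one r1 r2 rest
      have hRdl : R.dropLast = r1 :: M := by
        rw [hRdec, ← List.cons_append, List.dropLast_concat]
      have hdrop : (R.drop 1).dropLast = M := by
        rw [hRdec, List.drop_one, List.tail_cons, List.dropLast_concat]
      have hg : (L.length : Int) - R.dropLast.sum = g := by
        rw [← hsumR, hRdl, hRdec]
        simp only [List.sum_cons, List.sum_append, List.sum_nil]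
        ring
      rw [hlens, hhead, hlast, hg, hdrop]
      apply sorted_id_congr_perm
      rw [hRdec]
      exact List.perm_middle.symm
    · -- CASE 3: a proper trailing run of c0 is merged into the leading run
      rw [if_neg hz]
      have htwpos : 0 < tw.length := by
        rcases Nat.eq_zero_or_pos tw.length with h | h
        · exact absurd (by exact_mod_cast h) hz
        · exact h
      have hdwne : dw ≠ [] := by
        intro h
        apply hall
        have h1 := congrArg List.length hsplit
        rw [h] at h1
        simp at h1
        rw [h1]
      have hdwrne : dw.reverse ≠ [] := by simpa using hdwne
      obtain ⟨d0, dt, hd0⟩ := List.exists_cons_of_ne_nil hdwne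
      have hd0ne : ¬((d0 == c0) = true) := by
        intro hb
        have hcon : L.reverse.dropWhile (fun e => e == c0) = d0 :: dt := by rw [← hdw]; exact hd0
        have hne : L.reverse.dropWhile (fun e => e == c0) ≠ [] := by rw [hcon]; simp
        have hh := List.head_dropWhile_not (fun e => e == c0) (l := L.reverse) hne
        simp only [hcon, List.head_cons] at hh
        simp [hb] at hh
      have hlastdw : dw.reverse.getLast? ≠ some c0 := by
        rw [List.getLast?_reverse, hd0]
        intro hcon
        simp at hcon
        exact hd0ne (by simp [hcon])
      have hs1 : PySem.List.slice L none (some (-((tw.length : Int), (tw.length : Int)).1)) =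
          L.take (L.length - tw.length) := by
        rw [show (-(((tw.length : Int)), ((tw.length : Int))).1) = (-((tw.length : Nat) : Int)) from by simp]
        exact PySem.List.slice_to_neg_natCast L tw.length htwpos
      rw [hs1]
      have hpref : L.take (L.length - tw.length) = dw.reverse := by
        rw [hsplit]
        have h1 : (dw.reverse ++ List.replicate tw.length c0).length - tw.length = dw.reverse.length := by
          simp
        rw [h1, List.take_left]
      rw [hpref]
      obtain ⟨p0, p', hp⟩ := List.exists_cons_of_ne_nil hdwrne
      have hp0 : p0 = c0 := by
        have hh : L.head? = some c0 := by rw [hcs]; rfl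
        rw [hsplit, hp] at hh
        simpa using hh
      have hp' : dw.reverse = c0 :: p' := by rw [hp, hp0]
      have hfold := foldA_eq_rleFrom dw.reverse [] (((tw.length : Int), (tw.length : Int)).2) c0
      rw [List.nil_append] at hfold
      rw [hfold]
      have hA : rleFrom c0 (((tw.length : Int), (tw.length : Int)).2) dw.reverse =
          rleFrom c0 ((tw.length : Int) + 1) p' := by
        rw [hp']
        show rleFrom c0 (tw.length : Int) (c0 :: p') = _
        simp [rleFrom]
      rw [hA]
      obtain ⟨m, t0, h1, h2⟩ := rleFrom_shift p' c0 1 ((tw.length : Int) + 1)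
      rw [h2]
      -- R splits as the runs of dw.reverse plus the trailing run
      have ht_split : t = p' ++ List.replicate tw.length c0 := by
        have hc : c0 :: t = c0 :: (p' ++ List.replicate tw.length c0) := by
          rw [← hcs, hsplit, hp', List.cons_append]
        exact (List.cons_eq_cons.mp hc).2
      have hRdecomp : R = ((1 + m) :: t0) ++ [((tw.length : Nat) : Int)] := by
        rw [hR, ht_split,
          rleFrom_append_replicate c0 tw.length htwpos p' c0 1 (by rw [← hp']; exact hlastdw), h1]
      obtain ⟨w, ws, hw⟩ :=
        List.exists_cons_of_ne_nil (show t0 ++ [((tw.length : Nat) : Int)] ≠ [] from by simp)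
      have hRdec : R = (1 + m) :: (w :: ws) := by rw [hRdecomp, List.cons_append, hw]
      -- the last character of L is c0
      obtain ⟨k', hk'⟩ : ∃ k', tw.length = k' + 1 := ⟨tw.length - 1, by omega⟩
      have hLlast : L.getLast? = some c0 := by
        rw [hsplit, hk', List.replicate_succ', ← List.append_assoc, List.getLast?_concat]
      have hcond : (PySem.List.pyGetD L (-1) c0 == c0) = true := by
        rw [PySem.List.pyGetD_neg_one (h := hLne)]
        rw [List.getLast?_eq_some_getLast hLne] at hLlast
        simp [Option.some.inj hLlast]
      rw [if_pos hcond]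
      have hhead : PySem.List.pyGetD (pcuts 0 R) 0 0 = 1 + m := by
        rw [hRdec]; exact pcuts_pyGetD_zero (1 + m) w ws
      have hlast : PySem.List.pyGetD (pcuts 0 R) (-1) 0 = R.dropLast.sum := by
        rw [hRdec]
        exact pcuts_pyGetD_neg_one (1 + m) w ws
      have hRdl : R.dropLast = (1 + m) :: t0 := by
        rw [hRdecomp, List.dropLast_concat]
      have hdrop : (R.drop 1).dropLast = t0 := by
        rw [hRdecomp, List.cons_append, List.drop_one, List.tail_cons, List.dropLast_concat]
      have hmerge : PySem.List.pyGetD (pcuts 0 R) 0 0 + (L.length : Int) -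
          PySem.List.pyGetD (pcuts 0 R) (-1) 0 = (tw.length : Int) + 1 + m := by
        rw [hhead, hlast, hRdl, ← hsumR, hRdecomp]
        simp
        ring
      rw [hlens, hmerge, hdrop]
      apply sorted_id_congr_perm
      exact (List.perm_append_singleton _ _).symm

-- ===== VERDICT (by name: the statement is the Claim_ definition above) =====
theorem solution_spec : Claim_equal_solution := by
  intro s _ hpre
  unfold Spec_solution
  exact solution_eq s hpre
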